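-- pv_equiv track=rewrite | github.com/sroehl/projects | y5_watch/Y5.py | utf8_to_array
-- ===== SOURCE A (Python) =====
-- def utf8_to_array(string):
--     remainder = len(string) % 16
--     packets = int(len(string) / 16)
--     if remainder != 0:
--         packets += 1
--
--     arr = []
--     for i in range(0, packets):
--         arr.append([])
--         count = 3
--         for byte in bytearray(string[(i * 16):(i * 16) + 16], "UTF-8"):
--             arr[i].append(byte)
--             count += 1
--             # Need to add a zero byte at position 9
--             if count == 9:
--                 arr[i].append(0)
--                 count += 1
--         for j in range(count, 20):
--             arr[i].append(0)
--     return arr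
-- ===== SOURCE B (Python) =====
-- def utf8_to_array(string):
--     # Build each 17-byte packet directly by slicing: bytes 0-5, a zero, the rest, zero-padded to 17.
--     data = bytearray(string, "UTF-8")
--     arr = []
--     for i in range(0, len(data), 16):
--         b = list(data[i:i + 16])
--         packet = b[:6] + [0] + b[6:]
--         packet += [0] * (17 - len(packet))
--         arr.append(packet)
--     return arr
-- ===== Notes on version B (the rewrite author's own statement) =====
-- stated objective: simpler
-- what changed: Replaces A's per-byte counter loop with its count==9 insertion trick and a count-to-20 padding loop by direct slice-based packet construction: chunk, b[:6]+[0]+b[6:], pad to 17.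
import Mathlib
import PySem

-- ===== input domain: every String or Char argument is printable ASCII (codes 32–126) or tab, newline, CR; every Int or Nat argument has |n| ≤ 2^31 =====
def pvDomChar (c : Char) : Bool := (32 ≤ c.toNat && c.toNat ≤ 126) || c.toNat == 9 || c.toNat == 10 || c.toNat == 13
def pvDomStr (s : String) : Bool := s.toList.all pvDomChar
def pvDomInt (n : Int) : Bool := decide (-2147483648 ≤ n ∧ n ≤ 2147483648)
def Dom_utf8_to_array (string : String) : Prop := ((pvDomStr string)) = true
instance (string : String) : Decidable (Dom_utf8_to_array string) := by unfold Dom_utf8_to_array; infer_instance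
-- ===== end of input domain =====

-- B replaces A's per-byte counter loop (count==9 insertion trick + count-to-20 padding loop)
-- by direct slice-based packet construction (objective: simpler).
-- Both ports model UTF-8 bytes as the character code: exact on the ASCII domain Dom_utf8_to_array.

-- ===== PORT A =====
-- one loop step of A's inner 'for byte in bytearray(...)' (state: current row, count)
def utf8Step (p : List Int × Int) (byte : Int) : List Int × Int :=
  let row := p.1 ++ [byte]
  let count := p.2 + 1
  if count = 9 then (row ++ [0], count + 1) else (row, count)

def utf8_to_array (string : String) : List (List Int) :=
  let s := string.toList
  let remainder : Nat := s.length % 16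
  -- int(len/16): truncating division, = Nat division for a nonnegative length (exact)
  let packets0 : Nat := s.length / 16
  let packets : Nat := if remainder ≠ 0 then packets0 + 1 else packets0
  (List.range packets).foldl (fun arr i =>
    let chunk := PySem.List.slice s (some ((i * 16 : Nat) : Int)) (some (((i * 16 : Nat) : Int) + 16))
    let rc := chunk.foldl (fun p c => utf8Step p ((c.toNat : Int))) ([], 3)
    arr ++ [(PySem.List.pyRange rc.2 20 1).foldl (fun r _ => r ++ [(0 : Int)]) rc.1]) []

-- ===== PORT B =====
def utf8_to_array_alt (string : String) : List (List Int) :=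
  let data := string.toList.map (fun c => (c.toNat : Int))
  (PySem.List.pyRange 0 (data.length : Int) 16).foldl (fun arr i =>
    let b := PySem.List.slice data (some i) (some (i + 16))
    let packet := b.take 6 ++ [(0 : Int)] ++ b.drop 6
    arr ++ [packet ++ List.replicate (17 - packet.length) (0 : Int)]) []

-- ===== PRECONDITION & SPEC =====
def Spec_utf8_to_array (string : String) (out : List (List Int)) : Prop := out = utf8_to_array_alt string
instance (string : String) (out : List (List Int)) : Decidable (Spec_utf8_to_array string out) := by unfold Spec_utf8_to_array; infer_instance

-- ===== CLAIM (what is proved, stated in full; the proofs are below) =====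
def Claim_equal_utf8_to_array : Prop := ∀ (string : String), Dom_utf8_to_array string → Spec_utf8_to_array string (utf8_to_array string)

-- ===== LEMMAS AND PROOFS =====

-- A's inner loop never triggers the count==9 branch while the counter avoids 9
theorem utf8Step_fold_no (l : List Int) (acc : List Int) (c : Int)
    (h : ∀ k : Nat, k < l.length → c + k + 1 ≠ 9) :
    l.foldl utf8Step (acc, c) = (acc ++ l, c + l.length) := by
  induction l generalizing acc c with
  | nil => simp
  | cons x xs ih =>
    have h0 : c + 1 ≠ 9 := by simpa using h 0 (by simp)
    simp only [List.foldl_cons, utf8Step, if_neg h0]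
    rw [ih (acc ++ [x]) (c + 1) (fun k hk => by
      have := h (k + 1) (by simpa using Nat.succ_lt_succ hk)
      push_cast at this ⊢; omega)]
    simp; omega

-- characterization of A's inner loop from its real start state ([], 3)
theorem utf8Step_fold_char (l : List Int) :
    l.foldl utf8Step ([], 3) =
      (if l.length < 6 then l else l.take 6 ++ [0] ++ l.drop 6,
       3 + (l.length : Int) + if l.length < 6 then 0 else 1) := by
  by_cases h6 : l.length < 6
  · rw [utf8Step_fold_no l [] 3 (fun k hk => by omega)]
    simp [h6]
  · push_neg at h6
    have h5 : 5 < l.length := by omega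
    have hdec : l = l.take 5 ++ l[5] :: l.drop 6 := by
      conv_lhs => rw [← List.take_append_drop 5 l]
      rw [List.drop_eq_getElem_cons h5]
    have hlen5 : (l.take 5).length = 5 := by simp; omega
    conv_lhs => rw [hdec]
    rw [List.foldl_append]
    rw [utf8Step_fold_no (l.take 5) [] 3 (fun k hk => by rw [hlen5] at hk; omega)]
    simp only [List.foldl_cons, hlen5]
    have : utf8Step ([] ++ l.take 5, 3 + ((5 : Nat) : Int)) l[5] =
        (l.take 5 ++ [l[5]] ++ [0], 10) := by
      simp [utf8Step]
    rw [this]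
    rw [utf8Step_fold_no (l.drop 6) _ 10 (fun k hk => by omega)]
    have htake : l.take 6 = l.take 5 ++ [l[5]] := by
      have := List.take_add_one (l := l) (i := 5)
      simpa [List.getElem?_eq_getElem h5] using this
    simp only [if_neg (by omega : ¬ l.length < 6), htake]
    simp only [Prod.mk.injEq, List.append_assoc, List.cons_append, List.nil_append]
    refine ⟨trivial, ?_⟩
    simp only [List.length_drop]
    omega

-- A's padding loop appends (20 - c) zeros
theorem pad_loop (c : Int) (row : List Int) :
    (PySem.List.pyRange c 20 1).foldl (fun r _ => r ++ [(0 : Int)]) row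
      = row ++ List.replicate (20 - c).toNat (0 : Int) := by
  rw [PySem.List.foldl_append_singleton_eq_map (f := fun _ => (0 : Int))]
  congr 1
  rw [List.eq_replicate_iff]
  refine ⟨by simp [PySem.List.length_pyRange_one], fun b hb => ?_⟩
  simp only [List.mem_map] at hb
  obtain ⟨_, _, rfl⟩ := hb
  rfl

-- per-chunk equality: A's inner loop + padding = B's slice-built packet, for chunks ≤ 16 bytes
theorem packet_eq (l : List Int) (hl : l.length ≤ 16) :
    (let rc := l.foldl utf8Step ([], 3)
     (PySem.List.pyRange rc.2 20 1).foldl (fun r _ => r ++ [(0 : Int)]) rc.1)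
    = (let packet := l.take 6 ++ [(0 : Int)] ++ l.drop 6
       packet ++ List.replicate (17 - packet.length) (0 : Int)) := by
  simp only [utf8Step_fold_char, pad_loop]
  by_cases h6 : l.length < 6
  · have htake : l.take 6 = l := List.take_of_length_le (by omega)
    have hdrop : l.drop 6 = ([] : List Int) := List.drop_eq_nil_of_le (by omega)
    simp only [if_pos h6, htake, hdrop]
    have h1 : (20 - (3 + (l.length : Int) + 0)).toNat = (16 - l.length) + 1 := by omega
    have h2 : 17 - (l ++ [(0:Int)] ++ ([] : List Int)).length = 16 - l.length := by
      simp only [List.length_append, List.length_cons, List.length_nil]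
      omega
    rw [h1, h2, List.replicate_succ]
    simp
  · push_neg at h6
    simp only [if_neg (by omega : ¬ l.length < 6)]
    have h1 : (20 - (3 + (l.length : Int) + 1)).toNat = 16 - l.length := by omega
    have h2 : 17 - (l.take 6 ++ [(0:Int)] ++ l.drop 6).length = 16 - l.length := by
      simp only [List.length_append, List.length_take, List.length_cons, List.length_drop, List.length_nil]
      omega
    rw [h1, h2]

-- ===== VERDICT (by name: the statement is the Claim_ definition above) =====
theorem utf8_to_array_spec : Claim_equal_utf8_to_array := by
  intro string _
  unfold Spec_utf8_to_array utf8_to_array utf8_to_array_alt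
  set s := string.toList with hs
  simp only []
  -- both sides are maps over the same index list
  rw [PySem.List.foldl_append_singleton_eq_map
        (f := fun i => (PySem.List.pyRange
            ((PySem.List.slice s (some ((i * 16 : Nat) : Int)) (some (((i * 16 : Nat) : Int) + 16))).foldl
              (fun p c => utf8Step p ((c.toNat : Int))) ([], 3)).2 20 1).foldl
              (fun r _ => r ++ [(0 : Int)])
            ((PySem.List.slice s (some ((i * 16 : Nat) : Int)) (some (((i * 16 : Nat) : Int) + 16))).foldl
              (fun p c => utf8Step p ((c.toNat : Int))) ([], 3)).1)]
  rw [PySem.List.foldl_append_singleton_eq_map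
        (f := fun i =>
          (PySem.List.slice (s.map (fun c => (c.toNat : Int))) (some i) (some (i + 16))).take 6 ++ [(0 : Int)] ++
              (PySem.List.slice (s.map (fun c => (c.toNat : Int))) (some i) (some (i + 16))).drop 6 ++
            List.replicate (17 - ((PySem.List.slice (s.map (fun c => (c.toNat : Int))) (some i) (some (i + 16))).take 6 ++ [(0 : Int)] ++
              (PySem.List.slice (s.map (fun c => (c.toNat : Int))) (some i) (some (i + 16))).drop 6).length) (0 : Int))]
  simp only [List.nil_append]
  -- B's step-16 range is the image of List.range packets under (16·)
  rw [List.length_map, PySem.List.pyRange_of_pos 0 (s.length : Int) (by norm_num : (0:Int) < 16)]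
  have hpackets : (if (0 : Int) < (s.length : Int) then (((s.length : Int) - 0 + 16 - 1) / 16).toNat else 0)
      = (if s.length % 16 ≠ 0 then s.length / 16 + 1 else s.length / 16) := by
    by_cases h0 : 0 < s.length
    · rw [if_pos (by exact_mod_cast h0)]
      by_cases hr : s.length % 16 = 0 <;>
        simp only [hr, ne_eq, not_true_eq_false, not_false_eq_true, if_false, if_true] <;> omega
    · have h0' : s.length = 0 := by omega
      simp [h0']
  rw [hpackets, List.map_map]
  apply List.map_congr_left
  intro i hi
  simp only [List.mem_range] at hi
  have hi16 : i * 16 ≤ s.length := by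
    by_cases h : s.length % 16 ≠ 0 <;> simp [h] at hi <;> omega
  -- identify the two chunks
  have hchunkA : PySem.List.slice s (some ((i * 16 : Nat) : Int)) (some (((i * 16 : Nat) : Int) + 16))
      = (s.drop (i * 16)).take 16 := by
    have := PySem.List.slice_natCast_add s (i * 16) 16
    simpa using this
  have hchunkB : PySem.List.slice (s.map (fun c => (c.toNat : Int))) (some ((0 : Int) + 16 * (i : Int)))
        (some ((0 : Int) + 16 * (i : Int) + 16))
      = ((s.drop (i * 16)).take 16).map (fun c => (c.toNat : Int)) := by
    have h1 : ((0 : Int) + 16 * (i : Int)) = ((i * 16 : Nat) : Int) := by push_cast; ring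
    have h2 : ((0 : Int) + 16 * (i : Int) + 16) = ((i * 16 : Nat) : Int) + ((16 : Nat) : Int) := by
      push_cast; ring
    rw [h2, h1, PySem.List.slice_natCast_add]
    simp [List.map_take, List.map_drop]
  simp only [Function.comp]
  rw [hchunkA, hchunkB]
  set l := ((s.drop (i * 16)).take 16).map (fun c => (c.toNat : Int)) with hl
  have hfold : ((s.drop (i * 16)).take 16).foldl (fun p c => utf8Step p ((c.toNat : Int))) ([], 3)
      = l.foldl utf8Step ([], 3) := by
    rw [hl, List.foldl_map]
  rw [hfold]
  have hlen : l.length ≤ 16 := by simp [hl]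
  exact packet_eq l hlen
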